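-- pv_equiv track=rewrite | github.com/Mootbing/ship-name-maker | lovecalculator.py | Tinder
-- ===== SOURCE A (Python) =====
-- def Tinder(Name1, Name2): #stupid love calculator thing: sourced from: https://www.youtube.com/watch?v=oFsLVG7EAZ4
--
--     LoveArray = Name1.lower() + "loves" + Name2.lower()
--     DictionairyOfLove = {}
--     FinalArray = []
--     Score = 0
--
--     for character in LoveArray:
--         if character not in DictionairyOfLove:
--             DictionairyOfLove[character] = LoveArray.count(character)
--
--     for key in DictionairyOfLove:
--         FinalArray.append(DictionairyOfLove[key])
--
--     while len(FinalArray) > 1: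
--         Score += FinalArray.pop(0)
--
--     DigitOne = 0
--
--     for char in str(Score):
--         DigitOne += int(char)
--
--     return str(DigitOne) + str(FinalArray[0]) + "%"
-- ===== SOURCE B (Python) =====
-- def Tinder(Name1, Name2):
--     # One pass: remember the last character to appear for the first time; no dict,
--     # no FinalArray copy, no pop loop.
--     LoveArray = Name1.lower() + "loves" + Name2.lower()
--     seen = set()
--     last = None
--     for character in LoveArray:
--         if character not in seen:
--             seen.add(character)
--             last = character
--     count = LoveArray.count(last)
--     Score = len(LoveArray) - count
--     DigitOne = 0
--     for char in str(Score):
--         DigitOne += int(char)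
--     return str(DigitOne) + str(count) + "%"
-- ===== Notes on version B (the rewrite author's own statement) =====
-- stated objective: simpler
-- what changed: Replaces the frequency dict, the FinalArray copy and the pop(0)-until-one loop by a single pass that tracks the last character to appear for the first time, taking the score as len(LoveArray) minus that character's count.
import Mathlib
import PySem

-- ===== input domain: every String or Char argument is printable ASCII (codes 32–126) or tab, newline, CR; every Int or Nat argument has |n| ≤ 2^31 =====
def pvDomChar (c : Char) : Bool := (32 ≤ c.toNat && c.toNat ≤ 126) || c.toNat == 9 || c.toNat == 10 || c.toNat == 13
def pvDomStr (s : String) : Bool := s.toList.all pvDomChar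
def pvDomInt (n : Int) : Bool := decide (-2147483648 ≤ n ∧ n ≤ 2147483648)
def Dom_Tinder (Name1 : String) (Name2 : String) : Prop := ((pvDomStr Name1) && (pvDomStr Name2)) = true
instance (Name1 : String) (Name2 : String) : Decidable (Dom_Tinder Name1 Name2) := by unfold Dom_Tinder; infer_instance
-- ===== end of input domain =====

-- B replaces A's frequency dict + FinalArray copy + pop(0) loop by one pass that tracks the
-- last character to appear for the first time, taking the total as len(LoveArray) (objective: simpler).

-- ===== PORT A =====
-- 'for char in str(Score): DigitOne += int(char)'; Score ≥ 0 here so every char is a digit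
-- and int(char) = ofChars? is some (the .getD 0 default is unreachable).
def pvA_digitSum (n : Int) : Int :=
  (PySem.Int.toChars n).foldl (fun acc c => acc + ((PySem.Int.ofChars? [c]).getD 0)) 0

-- 'while len(FinalArray) > 1: Score += FinalArray.pop(0)'
def pvA_popLoop (score : Int) : List Int → Int × List Int
  | x :: y :: rest => pvA_popLoop (score + x) (y :: rest)
  | xs => (score, xs)

def Tinder (Name1 : String) (Name2 : String) : String :=
  let LoveArray : List Char :=
    PySem.Chars.lower Name1.toList ++ "loves".toList ++ PySem.Chars.lower Name2.toList
  -- 'if character not in DictionairyOfLove: DictionairyOfLove[character] = LoveArray.count(character)'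
  let d : PySem.Dict Char Int :=
    LoveArray.foldl
      (fun d c => if d.contains c then d else d.insert c ((LoveArray.count c : Nat) : Int))
      PySem.Dict.empty
  -- 'for key in DictionairyOfLove: FinalArray.append(DictionairyOfLove[key])'
  let FinalArray : List Int := d.values
  let r := pvA_popLoop 0 FinalArray
  let DigitOne := pvA_digitSum r.1
  -- FinalArray[0]: LoveArray always contains "loves", so r.2 is nonempty (default unreachable)
  String.mk (PySem.Int.toChars DigitOne ++ PySem.Int.toChars (PySem.List.pyGetD r.2 0 0) ++ ['%'])

-- ===== PORT B =====
-- the same digit-sum loop as in A's Python (Score ≥ 0, default unreachable)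
def pvB_digitSum (n : Int) : Int :=
  (PySem.Int.toChars n).foldl (fun acc c => acc + ((PySem.Int.ofChars? [c]).getD 0)) 0

def Tinder_alt (Name1 : String) (Name2 : String) : String :=
  let LoveArray : List Char :=
    PySem.Chars.lower Name1.toList ++ "loves".toList ++ PySem.Chars.lower Name2.toList
  -- 'if character not in seen: seen.add(character); last = character'   (last : Option Char, None initially)
  let st := LoveArray.foldl
    (fun st c => if PySem.Set.contains st.1 c then st else (PySem.Set.add st.1 c, some c))
    ((PySem.Set.empty : PySem.Set Char), (none : Option Char))
  -- 'count = LoveArray.count(last)'  (count of None is 0 in Python; unreachable, LoveArray ≠ "")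
  let count : Int := match st.2 with
    | some c => ((LoveArray.count c : Nat) : Int)
    | none => 0
  let Score : Int := (LoveArray.length : Int) - count
  String.mk (PySem.Int.toChars (pvB_digitSum Score) ++ PySem.Int.toChars count ++ ['%'])

-- ===== PRECONDITION & SPEC =====
def Spec_Tinder (Name1 : String) (Name2 : String) (out : String) : Prop := out = Tinder_alt Name1 Name2
instance (Name1 : String) (Name2 : String) (out : String) : Decidable (Spec_Tinder Name1 Name2 out) := by unfold Spec_Tinder; infer_instance

-- ===== CLAIM (what is proved, stated in full; the proofs are below) =====
def Claim_equal_Tinder : Prop := ∀ (Name1 : String) (Name2 : String), Dom_Tinder Name1 Name2 → Spec_Tinder Name1 Name2 (Tinder Name1 Name2)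

-- ===== LEMMAS AND PROOFS =====

-- A's dict loop over l, started from a dict whose items are s rendered through cnt,
-- has items (Set.update s l) rendered through cnt.
theorem pvA_dict_items (cnt : Char → Int) (l : List Char) (s : List Char) :
    (l.foldl (fun d c => if d.contains c then d else d.insert c (cnt c))
      (PySem.Dict.mk (s.map (fun c => (c, cnt c))))).items
      = (PySem.Set.update s l).map (fun c => (c, cnt c)) := by
  induction l generalizing s with
  | nil => rfl
  | cons c l ih =>
    have hbr : (PySem.Dict.mk (s.map (fun c => (c, cnt c)))).contains c = decide (c ∈ s) := by
      simp [PySem.Dict.contains_mk, List.any_map, Function.comp_def, List.any_beq']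
    have hupd : PySem.Set.update s (c :: l) = PySem.Set.update (PySem.Set.add s c) l := rfl
    by_cases hm : c ∈ s
    · have hc : (PySem.Dict.mk (s.map (fun c => (c, cnt c)))).contains c = true := by
        rw [hbr]; simp [hm]
      have hadd : PySem.Set.add s c = s := by simp [PySem.Set.add, PySem.Set.contains, hm]
      rw [hupd, hadd, ← ih s]
      simp [List.foldl_cons, hc]
    · have hc : (PySem.Dict.mk (s.map (fun c => (c, cnt c)))).contains c = false := by
        rw [hbr]; simp [hm]
      have hadd : PySem.Set.add s c = s ++ [c] := by
        simp [PySem.Set.add, PySem.Set.contains, hm]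
      have hins : ((PySem.Dict.mk (s.map (fun c => (c, cnt c)))).insert c (cnt c))
          = PySem.Dict.mk ((s ++ [c]).map (fun c => (c, cnt c))) := by
        apply PySem.Dict.ext
        rw [PySem.Dict.items_insert_of_not_contains _ _ hc]
        simp
      rw [hupd, hadd, ← ih (s ++ [c])]
      simp [List.foldl_cons, hc, hins]

-- B's seen/last loop: the last component is always the last element of the seen set.
theorem pvB_seen_last (l : List Char) (s : PySem.Set Char) :
    (l.foldl (fun st c => if PySem.Set.contains st.1 c then st else (PySem.Set.add st.1 c, some c))
      (s, s.getLast?))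
      = (PySem.Set.update s l, (PySem.Set.update s l).getLast?) := by
  induction l generalizing s with
  | nil => rfl
  | cons c l ih =>
    have hupd : PySem.Set.update s (c :: l) = PySem.Set.update (PySem.Set.add s c) l := rfl
    by_cases hm : c ∈ s
    · have hc : PySem.Set.contains s c = true := by simp [PySem.Set.contains, hm]
      have hadd : PySem.Set.add s c = s := by simp [PySem.Set.add, PySem.Set.contains, hm]
      rw [hupd, hadd]
      simpa [List.foldl_cons, hc, hm] using ih s
    · have hc : PySem.Set.contains s c = false := by simp [PySem.Set.contains, hm]
      have hadd : PySem.Set.add s c = s ++ [c] := by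
        simp [PySem.Set.add, PySem.Set.contains, hm]
      have hlast : (s ++ [c]).getLast? = some c := by simp
      rw [hupd, hadd]
      have := ih (s ++ [c])
      rw [hlast] at this
      simpa [List.foldl_cons, hc, hadd, hm] using this

-- the pop(0) loop sums everything but the last element, which stays behind
theorem pvA_popLoop_concat (ys : List Int) (x : Int) (score : Int) :
    pvA_popLoop score (ys ++ [x]) = (score + ys.sum, [x]) := by
  induction ys generalizing score with
  | nil => simp [pvA_popLoop]
  | cons a ys ih =>
    cases ys with
    | nil => simp [pvA_popLoop]
    | cons b ys =>
      have h1 : (a :: b :: ys) ++ [x] = a :: ((b :: ys) ++ [x]) := by simp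
      rw [h1]
      have h2 : pvA_popLoop score (a :: ((b :: ys) ++ [x]))
          = pvA_popLoop (score + a) ((b :: ys) ++ [x]) := rfl
      rw [h2, ih]
      simp [add_assoc]

-- sum of the counts of the distinct characters is the length
theorem pv_sum_counts (L : List Char) :
    ((PySem.Set.ofList L).map (fun c => ((L.count c : Nat) : Int))).sum = (L.length : Int) := by
  have hperm : (PySem.Set.ofList L).Perm L.dedup := by
    rw [List.perm_ext_iff_of_nodup (PySem.Set.nodup_ofList L) L.nodup_dedup]
    intro a; rw [PySem.Set.mem_ofList, List.mem_dedup]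
  have hnat : ((PySem.Set.ofList L).map (fun c => L.count c)).sum = L.length := by
    rw [(hperm.map (fun c => L.count c)).sum_eq]
    exact List.sum_map_count_dedup_eq_length L
  rw [← hnat, Nat.cast_list_sum, List.map_map]; rfl

-- the core equality, stated over the combined character list
theorem pv_main (L : List Char) (hne : L ≠ []) (cnt : Char → Int)
    (hcnt : cnt = fun c => ((L.count c : Nat) : Int)) :
    (let d : PySem.Dict Char Int :=
       L.foldl (fun d c => if d.contains c then d else d.insert c (cnt c)) PySem.Dict.empty
     let r := pvA_popLoop 0 d.values
     String.mk (PySem.Int.toChars (pvA_digitSum r.1) ++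
       PySem.Int.toChars (PySem.List.pyGetD r.2 0 0) ++ ['%']))
    = (let st := L.foldl
         (fun st c => if PySem.Set.contains st.1 c then st else (PySem.Set.add st.1 c, some c))
         ((PySem.Set.empty : PySem.Set Char), (none : Option Char))
       let count : Int := match st.2 with
         | some c => ((L.count c : Nat) : Int)
         | none => 0
       String.mk (PySem.Int.toChars (pvB_digitSum ((L.length : Int) - count)) ++
         PySem.Int.toChars count ++ ['%'])) := by
  subst hcnt
  -- name the distinct-character list and split off its last element
  have hDne : PySem.Set.ofList L ≠ [] := by
    obtain ⟨a, ha⟩ := List.exists_mem_of_ne_nil L hne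
    intro h
    exact absurd ((PySem.Set.mem_ofList L a).2 ha) (by simp [h])
  obtain hD | ⟨ys, z, hD⟩ := (PySem.Set.ofList L).eq_nil_or_concat
  · exact absurd hD hDne
  rw [List.concat_eq_append] at hD
  -- A side: dict items
  have hitems : (L.foldl
      (fun d c => if d.contains c then d
                  else d.insert c ((fun c => ((L.count c : Nat) : Int)) c))
      PySem.Dict.empty).items
      = (PySem.Set.ofList L).map (fun c => (c, ((L.count c : Nat) : Int))) := by
    have := pvA_dict_items (fun c => ((L.count c : Nat) : Int)) L []
    simpa [PySem.Set.update, PySem.Set.ofList_eq_foldl, PySem.Dict.empty] using this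
  -- B side: final (seen, last) state
  have hst : (L.foldl
      (fun st c => if PySem.Set.contains st.1 c then st else (PySem.Set.add st.1 c, some c))
      ((PySem.Set.empty : PySem.Set Char), (none : Option Char)))
      = (PySem.Set.ofList L, (PySem.Set.ofList L).getLast?) := by
    have := pvB_seen_last L (PySem.Set.empty : PySem.Set Char)
    simpa [PySem.Set.update, PySem.Set.ofList_eq_foldl, PySem.Set.empty] using this
  have hlast : (PySem.Set.ofList L).getLast? = some z := by rw [hD]; simp
  -- evaluate both lets
  simp only [hst, hlast, PySem.Dict.values, hitems]
  rw [hD]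
  have hvals : (((ys ++ [z]).map (fun c => (c, ((L.count c : Nat) : Int)))).map (·.2))
      = ys.map (fun c => ((L.count c : Nat) : Int)) ++ [((L.count z : Nat) : Int)] := by simp
  rw [hvals, pvA_popLoop_concat]
  have hsum : (ys.map (fun c => ((L.count c : Nat) : Int))).sum + ((L.count z : Nat) : Int)
      = (L.length : Int) := by
    have := pv_sum_counts L
    rw [hD] at this
    simpa using this
  have hScore : 0 + (ys.map (fun c => ((L.count c : Nat) : Int))).sum
      = (L.length : Int) - ((L.count z : Nat) : Int) := by omega
  simp only [hScore]
  rfl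

-- ===== VERDICT (by name: the statement is the Claim_ definition above) =====
theorem Tinder_spec : Claim_equal_Tinder := by
  intro Name1 Name2 _
  unfold Spec_Tinder Tinder Tinder_alt
  have hne : PySem.Chars.lower Name1.toList ++ "loves".toList ++ PySem.Chars.lower Name2.toList
      ≠ [] := by simp
  exact pv_main _ hne _ rfl
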